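-- pv_equiv track=rewrite | github.com/d7omdev/clipse-gui | clipse_gui/ui_components.py | highlight_search_term
-- ===== SOURCE A (Python) =====
-- def escape_markup(text):
--     """Escape special characters for Pango markup."""
--     return text.replace("&", "&amp;").replace("<", "&lt;").replace(">", "&gt;")
--
-- def highlight_search_term(text, search_term):
--     """Highlight search term matches in text using Pango markup."""
--     if not search_term or not search_term.strip():
--         return escape_markup(text)
--
--     search_lower = search_term.lower()
--     text_lower = text.lower()
--
--     result = []
--     last_end = 0
--
--     while True:
--         idx = text_lower.find(search_lower, last_end)
--         if idx == -1:
--             break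
--
--         # Add text before match
--         if idx > last_end:
--             result.append(escape_markup(text[last_end:idx]))
--
--         # Add highlighted match with inline background color
--         match = text[idx:idx + len(search_term)]
--         result.append(f'<span bgcolor="#ffcc00" fgcolor="#000000">{escape_markup(match)}</span>')
--
--         last_end = idx + len(search_term)
--
--     # Add remaining text
--     if last_end < len(text):
--         result.append(escape_markup(text[last_end:]))
--
--     return "".join(result)
-- ===== SOURCE B (Python) =====
-- def escape_markup(text):
--     """Escape special characters for Pango markup."""
--     return text.replace("&", "&amp;").replace("<", "&lt;").replace(">", "&gt;")
--
-- def highlight_search_term(text, search_term):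
--     """Highlight search term matches in text using Pango markup.
--
--     Single left-to-right character scan with a pending plain-text buffer,
--     instead of a find/resume loop over slices."""
--     if not search_term or not search_term.strip():
--         return escape_markup(text)
--
--     sl = search_term.lower()
--     tl = text.lower()
--     n = len(search_term)
--
--     out = []
--     buf = []
--     i = 0
--     while i < len(text):
--         if tl[i:i + len(sl)] == sl:
--             out.append(escape_markup("".join(buf)))
--             buf = []
--             out.append(
--                 f'<span bgcolor="#ffcc00" fgcolor="#000000">{escape_markup(text[i:i + n])}</span>'
--             )
--             i += n
--         else:
--             buf.append(text[i])
--             i += 1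
--     out.append(escape_markup("".join(buf)))
--     return "".join(out)
-- ===== Notes on version B (the rewrite author's own statement) =====
-- stated objective: alternative
-- what changed: Replaces the find/resume loop (repeated text_lower.find with last_end and slicing out the gap before each match) by a single left-to-right character scan that tests for a match at each position, buffers plain characters, and flushes the escaped buffer when a match or the end of the text is reached.
import Mathlib
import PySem

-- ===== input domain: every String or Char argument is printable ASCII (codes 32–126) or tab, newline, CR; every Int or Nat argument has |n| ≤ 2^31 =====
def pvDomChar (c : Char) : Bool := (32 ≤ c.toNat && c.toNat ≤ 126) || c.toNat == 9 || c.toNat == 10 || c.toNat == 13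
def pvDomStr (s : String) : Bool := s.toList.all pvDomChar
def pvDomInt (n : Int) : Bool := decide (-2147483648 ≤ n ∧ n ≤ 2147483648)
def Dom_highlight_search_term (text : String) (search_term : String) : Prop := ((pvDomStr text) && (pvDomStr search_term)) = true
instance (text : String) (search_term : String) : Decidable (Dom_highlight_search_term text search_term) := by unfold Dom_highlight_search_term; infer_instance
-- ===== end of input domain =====

-- B replaces A's find/resume loop by a single left-to-right scan with a pending plain-text buffer; same cost, alternative structure.

-- ===== PORT A =====
-- escape_markup (shared module helper, used verbatim by both A and B)
def pvEsc (s : List Char) : List Char :=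
  PySem.Chars.replace (PySem.Chars.replace (PySem.Chars.replace s ['&'] "&amp;".toList) ['<'] "&lt;".toList) ['>'] "&gt;".toList

-- the f-string '<span bgcolor="#ffcc00" fgcolor="#000000">{escape_markup(match)}</span>' (shared by A and B)
def pvSpan (m : List Char) : List Char :=
  "<span bgcolor=\"#ffcc00\" fgcolor=\"#000000\">".toList ++ pvEsc m ++ "</span>".toList

-- A's 'while True' find/resume loop; fuel = len(text)+1 only guards totality (each iteration advances last_end by ≥ 1)
def pvLoopA (text tl sl : List Char) (n : Nat) : Nat → Nat → List (List Char) → List (List Char)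
  | 0, _, acc => acc
  | fuel+1, lastEnd, acc =>
    if PySem.Chars.findFrom tl sl (lastEnd : Int) = -1 then
      if lastEnd < text.length then acc ++ [pvEsc (PySem.List.slice text (some (lastEnd : Int)) none)] else acc
    else
      pvLoopA text tl sl n fuel ((PySem.Chars.findFrom tl sl (lastEnd : Int)).toNat + n)
        ((if (lastEnd : Int) < PySem.Chars.findFrom tl sl (lastEnd : Int) then
            acc ++ [pvEsc (PySem.List.slice text (some (lastEnd : Int)) (some (PySem.Chars.findFrom tl sl (lastEnd : Int))))]
          else acc)
         ++ [pvSpan (PySem.List.slice text (some (PySem.Chars.findFrom tl sl (lastEnd : Int))) (some (PySem.Chars.findFrom tl sl (lastEnd : Int) + (n : Int))))])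

def highlight_search_term (text : String) (search_term : String) : String :=
  if search_term.toList = [] ∨ PySem.Chars.strip search_term.toList = [] then
    String.ofList (pvEsc text.toList)
  else
    String.ofList (PySem.Chars.join []
      (pvLoopA text.toList (PySem.Chars.lower text.toList) (PySem.Chars.lower search_term.toList)
        search_term.toList.length (text.toList.length + 1) 0 []))

-- ===== PORT B =====
-- B's single scan: i walks the text, buf holds pending plain characters, flushed (escaped) at each match and at the end;
-- fuel = len(text)+1 only guards totality (i advances by ≥ 1 each iteration)
def pvScanB (text tl sl : List Char) (n : Nat) : Nat → Nat → List Char → List (List Char) → List (List Char)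
  | 0, _, buf, out => out ++ [pvEsc buf]
  | fuel+1, i, buf, out =>
    if i < text.length then
      if PySem.List.slice tl (some (i : Int)) (some ((i : Int) + (sl.length : Int))) = sl then
        pvScanB text tl sl n fuel (i + n) []
          (out ++ [pvEsc buf, pvSpan (PySem.List.slice text (some (i : Int)) (some ((i : Int) + (n : Int))))])
      else
        pvScanB text tl sl n fuel (i + 1) (buf ++ [PySem.List.pyGetD text (i : Int) ' ']) out
    else out ++ [pvEsc buf]

def highlight_search_term_alt (text : String) (search_term : String) : String :=
  if search_term.toList = [] ∨ PySem.Chars.strip search_term.toList = [] then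
    String.ofList (pvEsc text.toList)
  else
    String.ofList (PySem.Chars.join []
      (pvScanB text.toList (PySem.Chars.lower text.toList) (PySem.Chars.lower search_term.toList)
        search_term.toList.length (text.toList.length + 1) 0 [] []))

-- ===== PRECONDITION & SPEC =====
def Spec_highlight_search_term (text : String) (search_term : String) (out : String) : Prop := out = highlight_search_term_alt text search_term
instance (text : String) (search_term : String) (out : String) : Decidable (Spec_highlight_search_term text search_term out) := by unfold Spec_highlight_search_term; infer_instance

-- ===== CLAIM (what is proved, stated in full; the proofs are below) =====
def Claim_equal_highlight_search_term : Prop := ∀ (text : String) (search_term : String), Dom_highlight_search_term text search_term → Spec_highlight_search_term text search_term (highlight_search_term text search_term)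

-- ===== LEMMAS AND PROOFS =====

theorem pv_join_nil (l : List (List Char)) : PySem.Chars.join [] l = l.flatten := by
  simp [PySem.Chars.join]
  induction l with
  | nil => rfl
  | cons a t ih => cases t <;> simp_all [List.intercalate]

theorem pv_replace_go (a : Char) (new : List Char) :
    ∀ (fuel : Nat) (l acc : List Char), l.length ≤ fuel →
      PySem.Chars.replace.go [a] new fuel l acc
        = acc.reverse ++ l.flatMap (fun c => if c = a then new else [c]) := by
  intro fuel
  induction fuel with
  | zero =>
    intro l acc h
    have : l = [] := by cases l <;> simp_all
    subst this
    simp [PySem.Chars.replace.go]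
  | succ f ih =>
    intro l acc h
    cases l with
    | nil => simp [PySem.Chars.replace.go]
    | cons c t =>
      by_cases hc : c = a
      · subst hc
        simp only [PySem.Chars.replace.go, List.isPrefixOf, beq_self_eq_true, Bool.true_and, if_true]
        rw [ih _ _ (by simpa using Nat.le_of_succ_le_succ h)]
        simp
      · simp only [PySem.Chars.replace.go]
        have hpre : [a].isPrefixOf (c :: t) = false := by
          simp [List.isPrefixOf]
          exact fun h' => absurd h'.symm hc
        rw [hpre]
        simp only [if_false, Bool.false_eq_true]
        rw [ih _ _ (by simpa using Nat.le_of_succ_le_succ h)]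
        simp [hc]

theorem pv_replace_single (s : List Char) (a : Char) (new : List Char) :
    PySem.Chars.replace s [a] new = s.flatMap (fun c => if c = a then new else [c]) := by
  rw [PySem.Chars.replace]
  simp only [List.isEmpty_cons, Bool.false_eq_true, if_false]
  simpa using pv_replace_go a new s.length s [] le_rfl

theorem pv_esc_append (x y : List Char) : pvEsc (x ++ y) = pvEsc x ++ pvEsc y := by
  simp [pvEsc, pv_replace_single, List.flatMap_append]

theorem pv_esc_nil : pvEsc [] = [] := rfl

theorem pv_match_iff (u sl : List Char) (j : Nat) :
    (PySem.List.slice u (some (j : Int)) (some ((j : Int) + (sl.length : Int))) = sl) ↔ sl <+: u.drop j := by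
  rw [PySem.List.slice_natCast_add]
  rw [List.prefix_iff_eq_take]
  constructor
  · intro h; exact h.symm
  · intro h; exact h.symm

theorem pv_infix_of_prefix_drop (u sl : List Char) (k j : Nat) (hkj : k ≤ j)
    (h : sl <+: u.drop j) : sl <:+: u.drop k := by
  have h1 : u.drop j = (u.drop k).drop (j - k) := by
    rw [List.drop_drop]; congr 1; omega
  rw [h1] at h
  exact h.isInfix.trans (List.drop_suffix _ _).isInfix

theorem pv_scan_fuel (text tl sl : List Char) (n : Nat) (hn : 1 ≤ n) :
    ∀ (f1 f2 k : Nat) (buf : List Char) (out : List (List Char)),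
      text.length - k < f1 → text.length - k < f2 →
      pvScanB text tl sl n f1 k buf out = pvScanB text tl sl n f2 k buf out := by
  intro f1
  induction f1 with
  | zero => intro f2 k buf out h1 h2; omega
  | succ f ih =>
    intro f2 k buf out h1 h2
    cases f2 with
    | zero => omega
    | succ g =>
      simp only [pvScanB]
      by_cases hlt : k < text.length
      · simp only [hlt, if_true]
        by_cases hm : PySem.List.slice tl (some (k : Int)) (some ((k : Int) + (sl.length : Int))) = sl
        · simp only [hm, if_true]
          exact ih g (k + n) [] _ (by omega) (by omega)
        · simp only [hm, if_false]
          exact ih g (k + 1) _ out (by omega) (by omega)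
      · simp [hlt]

theorem pv_scan_acc (text tl sl : List Char) (n : Nat) :
    ∀ (fuel i : Nat) (buf : List Char) (out : List (List Char)),
      (pvScanB text tl sl n fuel i buf out).flatten
        = out.flatten ++ pvEsc buf ++ (pvScanB text tl sl n fuel i [] []).flatten := by
  intro fuel
  induction fuel with
  | zero => intro i buf out; simp [pvScanB, pv_esc_nil]
  | succ f ih =>
    intro i buf out
    simp only [pvScanB]
    by_cases hlt : i < text.length
    · simp only [hlt, if_true]
      by_cases hm : PySem.List.slice tl (some (i : Int)) (some ((i : Int) + (sl.length : Int))) = sl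
      · simp only [hm, if_true]
        rw [ih (i + n) [] _, ih (i + n) [] ([] ++ _)]
        simp [pv_esc_nil]
      · simp only [hm, if_false]
        rw [ih (i + 1) _ out, ih (i + 1) ([] ++ _) []]
        simp [pv_esc_append]
    · simp [hlt, pv_esc_nil]

theorem pv_scan_gap (text tl sl : List Char) (n : Nat) :
    ∀ (d k fuel : Nat) (buf : List Char) (out : List (List Char)),
      (∀ j, k ≤ j → j < k + d → ¬ (PySem.List.slice tl (some (j : Int)) (some ((j : Int) + (sl.length : Int))) = sl)) →
      k + d ≤ text.length → text.length - k < fuel →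
      pvScanB text tl sl n fuel k buf out
        = pvScanB text tl sl n (fuel - d) (k + d) (buf ++ (text.drop k).take d) out := by
  intro d
  induction d with
  | zero => intro k fuel buf out _ _ _; simp
  | succ d ih =>
    intro k fuel buf out hnm hle hf
    cases fuel with
    | zero => omega
    | succ f =>
      have hk : k < text.length := by omega
      simp only [pvScanB, hk, if_true]
      rw [if_neg (hnm k le_rfl (by omega))]
      rw [ih (k + 1) f _ out (fun j hj1 hj2 => hnm j (by omega) (by omega)) (by omega) (by omega)]
      have hc : PySem.List.pyGetD text (k : Int) ' ' = text[k] := by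
        rw [PySem.List.pyGetD_natCast]
        simp [List.getD, hk]
      rw [hc]
      have hdrop : text.drop k = text[k] :: text.drop (k + 1) := List.drop_eq_getElem_cons hk
      have : Nat.succ f - (d + 1) = f - d := by omega
      rw [this]
      have : k + (d + 1) = k + 1 + d := by omega
      rw [this]
      rw [hdrop, List.take_succ_cons]
      simp

theorem pv_main (text tl sl : List Char) (n : Nat)
    (htl : tl.length = text.length) (hsl : sl.length = n) (hn : 1 ≤ n) :
    ∀ (fuelA k : Nat) (acc : List (List Char)),
      k ≤ text.length → text.length - k < fuelA →
      (pvLoopA text tl sl n fuelA k acc).flatten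
        = acc.flatten ++ (pvScanB text tl sl n (text.length + 1) k [] []).flatten := by
  intro fuelA
  induction fuelA with
  | zero => intro k acc hk hf; omega
  | succ f ih =>
    intro k acc hk hf
    have hk' : k ≤ tl.length := by omega
    by_cases hneg : PySem.Chars.findFrom tl sl (k : Int) = -1
    · -- no further match: scan just escapes the rest
      have hno : ∀ j, k ≤ j → ¬ sl <+: tl.drop j := by
        intro j hj hp
        rw [PySem.Chars.findFrom_natCast_eq_neg_one_iff tl sl k hk'] at hneg
        exact hneg (pv_infix_of_prefix_drop tl sl k j hj hp)
      have hnm : ∀ j, k ≤ j → j < k + (text.length - k) →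
          ¬ (PySem.List.slice tl (some (j : Int)) (some ((j : Int) + (sl.length : Int))) = sl) := by
        intro j hj _ hm
        exact hno j hj ((pv_match_iff tl sl j).mp hm)
      rw [pv_scan_gap text tl sl n (text.length - k) k (text.length + 1) [] [] hnm (by omega) (by omega)]
      have hkk : k + (text.length - k) = text.length := by omega
      rw [hkk]
      have hfuel1 : text.length + 1 - (text.length - k) = k + 1 := by omega
      rw [hfuel1]
      simp only [pvScanB, lt_irrefl, if_false]
      simp only [pvLoopA, hneg, if_true]
      have htake : (text.drop k).take (text.length - k) = text.drop k := by
        rw [← List.length_drop]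
        exact List.take_length
      by_cases hlt : k < text.length
      · simp only [hlt, if_true]
        rw [PySem.List.slice_from_natCast]
        simp [htake]
      · have : k = text.length := by omega
        subst this
        simp [pv_esc_nil]
    · -- first match at j = findFrom.toNat
      obtain ⟨h1, h2, h3⟩ := PySem.Chars.findFrom_natCast_spec tl sl k hk' hneg
      have h0 : (0 : Int) ≤ PySem.Chars.findFrom tl sl (k : Int) := le_trans (by positivity) h1
      set j := (PySem.Chars.findFrom tl sl (k : Int)).toNat with hjdef
      have hjcast : PySem.Chars.findFrom tl sl (k : Int) = (j : Int) := by omega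
      have hkj : k ≤ j := by omega
      have hjn : j + n ≤ text.length := by
        have := h2.length_le
        simp [List.length_drop, htl, hsl] at this
        omega
      -- right side: walk the gap, then take the match step
      have hnm : ∀ m, k ≤ m → m < k + (j - k) →
          ¬ (PySem.List.slice tl (some (m : Int)) (some ((m : Int) + (sl.length : Int))) = sl) := by
        intro m hm1 hm2 hm
        exact h3 m hm1 (by omega) ((pv_match_iff tl sl m).mp hm)
      rw [pv_scan_gap text tl sl n (j - k) k (text.length + 1) [] [] hnm (by omega) (by omega)]
      have hkk : k + (j - k) = j := by omega
      rw [hkk]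
      have hfuel1 : text.length + 1 - (j - k) = text.length + 1 - j + k := by omega
      have hjlt : j < text.length := by omega
      have hmj : PySem.List.slice tl (some (j : Int)) (some ((j : Int) + (sl.length : Int))) = sl := by
        rw [pv_match_iff]; exact h2
      rw [hfuel1]
      have hfeq : text.length + 1 - j + k = (text.length - j + k) + 1 := by omega
      rw [hfeq]
      simp only [pvScanB, hjlt, if_true, hmj]
      rw [pv_scan_acc text tl sl n _ (j + n) [] _]
      rw [pv_scan_fuel text tl sl n hn (text.length - j + k) (text.length + 1) (j + n) [] []
        (by omega) (by omega)]
      -- left side: unfold one A-iteration and use the IH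
      simp only [pvLoopA, hneg, if_false]
      simp only [hjcast, Int.toNat_natCast]
      rw [ih (j + n) _ (by omega) (by omega)]
      have hm_eq : PySem.List.slice text (some (j : Int)) (some ((j : Int) + (n : Int)))
          = (text.drop j).take n := PySem.List.slice_natCast_add text j n
      by_cases hklt : k < j
      · have hklt' : (k : Int) < (j : Int) := by omega
        simp only [hklt', if_true]
        have : PySem.List.slice text (some (k : Int)) (some ((j : Int)))
            = (text.drop k).take (j - k) := PySem.List.slice_natCast text k j
        simp [this, hm_eq, pv_esc_nil, pvSpan]
      · have hkeq : k = j := by omega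
        simp only [hkeq, lt_self_iff_false, if_false, Nat.sub_self, List.take_zero]
        simp [hm_eq, pv_esc_nil, pvSpan]

-- ===== VERDICT (by name: the statement is the Claim_ definition above) =====
theorem highlight_search_term_spec : Claim_equal_highlight_search_term := by
  intro text search_term _
  unfold Spec_highlight_search_term highlight_search_term highlight_search_term_alt
  by_cases hg : search_term.toList = [] ∨ PySem.Chars.strip search_term.toList = []
  · rw [if_pos hg, if_pos hg]
  · rw [if_neg hg, if_neg hg]
    congr 1
    rw [pv_join_nil, pv_join_nil]
    have hne : search_term.toList ≠ [] := fun h => hg (Or.inl h)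
    have hn : 1 ≤ search_term.toList.length := List.length_pos_iff.mpr hne
    have := pv_main text.toList (PySem.Chars.lower text.toList) (PySem.Chars.lower search_term.toList)
      search_term.toList.length (by simp [PySem.Chars.lower]) (by simp [PySem.Chars.lower]) hn
      (text.toList.length + 1) 0 [] (by omega) (by omega)
    simpa using this
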